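-- pv_equiv track=rewrite | github.com/DiMesq/AAI_project | omniglot_dataset.py | stroke_metadata
-- ===== SOURCE A (Python) =====
-- def stroke_metadata(stroke_data):
--     num_strokes = []
--     strokes_len = []
--     max_num_strokes = 0
--     max_len_stroke = 0
--     for example in stroke_data:
--         num_strokes.append(len(example))
--         if len(example) > max_num_strokes:
--             max_num_strokes = len(example)
--         strokes_len.append([])
--         for stroke in example:
--             strokes_len[-1] += [len(stroke)]
--             if len(stroke) > max_len_stroke:
--                 max_len_stroke = len(stroke)
--     return num_strokes, strokes_len, max_num_strokes, max_len_stroke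
-- ===== SOURCE B (Python) =====
-- def stroke_metadata(stroke_data):
--     # Build the inner length lists first, then derive num_strokes from them,
--     # and obtain each maximum by sorting and taking the last element.
--     strokes_len = [[len(stroke) for stroke in example] for example in stroke_data]
--     num_strokes = [len(lens) for lens in strokes_len]
--     counts_sorted = sorted(num_strokes)
--     max_num_strokes = counts_sorted[-1] if counts_sorted else 0
--     flat_sorted = sorted(l for lens in strokes_len for l in lens)
--     max_len_stroke = flat_sorted[-1] if flat_sorted else 0
--     return num_strokes, strokes_len, max_num_strokes, max_len_stroke
-- ===== Notes on version B (the rewrite author's own statement) =====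
-- stated objective: alternative
-- what changed: A fuses everything into one loop with running maxima; B builds the inner length lists by comprehension, derives num_strokes as the lengths of those lists rather than of the raw examples, and computes each maximum by sorting the candidates and taking the last element instead of a running comparison.
import Mathlib
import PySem

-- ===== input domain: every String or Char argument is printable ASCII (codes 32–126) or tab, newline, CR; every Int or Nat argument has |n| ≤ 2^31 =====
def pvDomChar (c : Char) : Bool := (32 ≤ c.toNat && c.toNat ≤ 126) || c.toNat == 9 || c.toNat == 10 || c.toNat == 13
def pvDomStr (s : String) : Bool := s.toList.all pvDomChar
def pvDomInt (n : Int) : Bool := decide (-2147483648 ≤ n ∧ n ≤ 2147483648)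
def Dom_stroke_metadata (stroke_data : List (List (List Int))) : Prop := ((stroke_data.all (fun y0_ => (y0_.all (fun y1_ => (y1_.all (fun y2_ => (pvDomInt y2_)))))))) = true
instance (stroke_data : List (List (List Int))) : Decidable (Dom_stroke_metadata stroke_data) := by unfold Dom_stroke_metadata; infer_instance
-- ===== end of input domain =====

-- B builds the inner length lists first, derives num_strokes from them, and computes each
-- maximum by sorting the candidate lengths and taking the last element instead of A's fused
-- loop with running maxima (objective: alternative; not faster).


-- ===== PORT A =====
-- inner loop body: strokes_len[-1] += [len(stroke)]; if len(stroke) > max_len_stroke: …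
-- (the list under mutation is carried as the first state component)
def strokeA_inner (acc : List Int × Int) (stroke : List Int) : List Int × Int :=
  (acc.1 ++ [(stroke.length : Int)],
   if (stroke.length : Int) > acc.2 then (stroke.length : Int) else acc.2)

-- outer loop body over one example
def strokeA_step (acc : List Int × List (List Int) × Int × Int) (ex : List (List Int)) :
    List Int × List (List Int) × Int × Int :=
  let ns := acc.1 ++ [(ex.length : Int)]
  let mns := if (ex.length : Int) > acc.2.2.1 then (ex.length : Int) else acc.2.2.1
  let inner := ex.foldl strokeA_inner ([], acc.2.2.2)
  (ns, acc.2.1 ++ [inner.1], mns, inner.2)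

def stroke_metadata (stroke_data : List (List (List Int))) : List Int × List (List Int) × Int × Int :=
  stroke_data.foldl strokeA_step ([], [], 0, 0)

-- ===== PORT B =====
-- 'xs[-1] if xs else 0' is ported as xs.getLast?.getD 0 (exact: getLast? is none iff xs empty)
def stroke_metadata_alt (stroke_data : List (List (List Int))) : List Int × List (List Int) × Int × Int :=
  let strokes_len := stroke_data.map (fun ex => ex.map (fun stroke => (stroke.length : Int)))
  let num_strokes := strokes_len.map (fun lens => (lens.length : Int))
  let counts_sorted := PySem.List.sorted num_strokes (fun y => y) false
  let max_num_strokes := counts_sorted.getLast?.getD 0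
  let flat_sorted := PySem.List.sorted (strokes_len.flatMap id) (fun y => y) false
  let max_len_stroke := flat_sorted.getLast?.getD 0
  (num_strokes, strokes_len, max_num_strokes, max_len_stroke)

-- ===== PRECONDITION & SPEC =====
def Spec_stroke_metadata (stroke_data : List (List (List Int))) (out : List Int × List (List Int) × Int × Int) : Prop := out = stroke_metadata_alt stroke_data
instance (stroke_data : List (List (List Int))) (out : List Int × List (List Int) × Int × Int) : Decidable (Spec_stroke_metadata stroke_data out) := by unfold Spec_stroke_metadata; infer_instance

-- ===== CLAIM (what is proved, stated in full; the proofs are below) =====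
def Claim_equal_stroke_metadata : Prop := ∀ (stroke_data : List (List (List Int))), Dom_stroke_metadata stroke_data → Spec_stroke_metadata stroke_data (stroke_metadata stroke_data)

-- ===== LEMMAS AND PROOFS =====

theorem strokeA_inner_char (ex : List (List Int)) :
    ∀ (cur : List Int) (m : Int),
      ex.foldl strokeA_inner (cur, m) =
        (cur ++ ex.map (fun s => (s.length : Int)),
         (ex.map (fun s => (s.length : Int))).foldl max m) := by
  induction ex with
  | nil => simp
  | cons s t ih =>
      intro cur m
      simp only [List.foldl_cons, List.map_cons, strokeA_inner, ih, Prod.mk.injEq]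
      refine ⟨by simp, ?_⟩
      congr 1
      omega

theorem strokeA_char (sd : List (List (List Int))) :
    ∀ (ns : List Int) (sl : List (List Int)) (mns mls : Int),
      sd.foldl strokeA_step (ns, sl, mns, mls) =
        (ns ++ sd.map (fun e => (e.length : Int)),
         sl ++ sd.map (fun e => e.map (fun s => (s.length : Int))),
         (sd.map (fun e => (e.length : Int))).foldl max mns,
         (sd.flatMap (fun e => e.map (fun s => (s.length : Int)))).foldl max mls) := by
  induction sd with
  | nil => simp
  | cons e t ih =>
      intro ns sl mns mls
      simp only [List.foldl_cons, List.map_cons, List.flatMap_cons, strokeA_step,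
        strokeA_inner_char, ih, Prod.mk.injEq]
      refine ⟨by simp, by simp, ?_, by simp [List.foldl_append]⟩
      congr 1
      omega

theorem foldl_max_eq (l : List Int) (m : Int) :
    ∀ a : Int, (∀ x ∈ l, x ≤ m) → (m ∈ l ∨ a = m) → a ≤ m → l.foldl max a = m := by
  induction l with
  | nil =>
      intro a _ hmem ha
      rcases hmem with h | h
      · exact absurd h (List.not_mem_nil)
      · simpa [h]
  | cons x t ih =>
      intro a hle hmem ha
      have hx : x ≤ m := hle x List.mem_cons_self
      have hle' : ∀ y ∈ t, y ≤ m := fun y hy => hle y (List.mem_cons_of_mem _ hy)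
      simp only [List.foldl_cons]
      rcases hmem with h | h
      · rcases List.mem_cons.mp h with h' | h'
        · exact ih (max a x) hle' (Or.inr (by omega)) (by omega)
        · exact ih (max a x) hle' (Or.inl h') (by omega)
      · exact ih (max a x) hle' (Or.inr (by omega)) (by omega)

theorem last_ge_of_pairwise (s : List Int) (h : s.Pairwise (· ≤ ·)) (m : Int)
    (hm : s.getLast? = some m) : ∀ y ∈ s, y ≤ m := by
  intro y hy
  rw [List.getLast?_eq_head?_reverse] at hm
  have hrev : s.reverse.Pairwise (fun a b => b ≤ a) := (List.pairwise_reverse).mpr h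
  cases hr : s.reverse with
  | nil => simp [hr] at hm
  | cons z t =>
      rw [hr] at hm hrev
      have hz : z = m := by simp at hm; exact hm
      have hy' : y ∈ z :: t := by rw [← hr]; simpa using hy
      rcases List.mem_cons.mp hy' with h' | h'
      · omega
      · have := (List.pairwise_cons.mp hrev).1 y h'
        omega

theorem sorted_last_eq_foldl_max (l : List Int) (hnn : ∀ x ∈ l, 0 ≤ x) :
    ((PySem.List.sorted l (fun y => y) false).getLast?.getD 0) = l.foldl max 0 := by
  cases hs : (PySem.List.sorted l (fun y => y) false).getLast? with
  | none =>
      have hnil : PySem.List.sorted l (fun y => y) false = [] :=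
        List.getLast?_eq_none_iff.mp hs
      have hl : l = [] := (PySem.List.sorted_eq_nil_iff l (fun y => y) false).mp hnil
      simp [hl]
  | some m =>
      have hpw : (PySem.List.sorted l (fun y => y) false).Pairwise (fun a b => a ≤ b) := by
        simpa using PySem.List.sorted_pairwise (xs := l) (key := fun y => y)
      have hmem : m ∈ l := by
        have : m ∈ PySem.List.sorted l (fun y => y) false := by
          exact List.mem_of_getLast? hs
        exact (PySem.List.mem_sorted l (fun y => y) false m).mp this
      have hge : ∀ y ∈ l, y ≤ m := by
        intro y hy
        exact last_ge_of_pairwise _ hpw m hs y ((PySem.List.mem_sorted l (fun y => y) false y).mpr hy)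
      simp only [Option.getD_some]
      exact (foldl_max_eq l m 0 hge (Or.inl hmem) (hnn m hmem)).symm

-- ===== VERDICT (by name: the statement is the Claim_ definition above) =====
theorem stroke_metadata_spec : Claim_equal_stroke_metadata := by
  intro sd _
  show stroke_metadata sd = stroke_metadata_alt sd
  unfold stroke_metadata stroke_metadata_alt
  rw [strokeA_char]
  simp only [List.nil_append, List.flatMap_id, Prod.mk.injEq]
  refine ⟨by simp, trivial, ?_, ?_⟩
  · rw [show ((sd.map (fun ex => ex.map (fun stroke => (stroke.length : Int)))).map
          (fun lens => (lens.length : Int)))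
        = sd.map (fun e => (e.length : Int)) by simp,
      sorted_last_eq_foldl_max]
    intro x hx
    obtain ⟨e, _, he⟩ := List.mem_map.mp hx
    simp [← he]
  · rw [show ((sd.map (fun ex => ex.map fun stroke => (stroke.length : Int))).flatten)
        = sd.flatMap (fun e => e.map (fun s => (s.length : Int))) from rfl,
      sorted_last_eq_foldl_max]
    intro x hx
    obtain ⟨e, _, he⟩ := List.mem_flatMap.mp hx
    obtain ⟨s, _, hs⟩ := List.mem_map.mp he
    simp [← hs]
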